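-- pv_equiv track=rewrite | github.com/daniel-reich/turbo-robot | PSg77AZJGACk4a7gt_12.py | meme_sum
-- ===== SOURCE A (Python) =====
-- def meme_sum(a, b):
--   sa, sb = str(a), str(b)
--   if len(sa) > len(sb):
--     sb = '0' * (len(sa) - len(sb)) + sb
--   elif len(sb) > len(sa):
--     sa = '0' * (len(sb) - len(sa)) + sa
--   res = ''
--   for i, j in zip(sa, sb):
--     res += str(int(i) + int(j))
--   return int(res)
-- ===== SOURCE B (Python) =====
-- def meme_sum(a, b):
--   sums = []
--   while a > 0 or b > 0:
--     sums.append(a % 10 + b % 10)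
--     a //= 10
--     b //= 10
--   if not sums:
--     sums = [0]
--   return int(''.join(str(s) for s in reversed(sums)))
-- ===== Notes on version B (the rewrite author's own statement) =====
-- stated objective: alternative
-- what changed: Replaces A's string manipulation (str(), '0' left-padding, zip over characters, per-character int() parsing, string concatenation) by pure digit arithmetic: a divmod-by-10 loop collects the carry-free digit sums, which are formatted once at the end.
import Mathlib
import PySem

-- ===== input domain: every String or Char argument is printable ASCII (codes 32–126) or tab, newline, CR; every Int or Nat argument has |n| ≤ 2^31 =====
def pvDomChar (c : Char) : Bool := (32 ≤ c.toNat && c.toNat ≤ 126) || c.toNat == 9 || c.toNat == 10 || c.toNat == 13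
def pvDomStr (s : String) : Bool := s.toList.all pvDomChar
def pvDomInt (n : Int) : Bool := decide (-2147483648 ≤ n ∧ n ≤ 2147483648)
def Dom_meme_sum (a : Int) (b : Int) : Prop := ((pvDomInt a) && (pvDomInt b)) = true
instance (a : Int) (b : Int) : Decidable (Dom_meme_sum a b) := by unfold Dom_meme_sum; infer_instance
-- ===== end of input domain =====

-- B replaces A's string manipulation (left-padding with '0', character zip, per-character
-- int() parsing, string concatenation) by a divmod-by-10 arithmetic loop collecting the
-- carry-free digit sums, formatted once at the end (alternative algorithm, same cost class).


-- ===== PORT A =====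
-- int(c) for a single character c; 0 stands in for Python's ValueError (excluded by Pre_)
def pyDigit (c : Char) : Int := (PySem.Int.ofChars? [c]).getD 0
-- str(int(i) + int(j)) as a list of chars
def memeChunk (x y : Char) : List Char := PySem.Int.toChars (pyDigit x + pyDigit y)

def meme_sum (a : Int) (b : Int) : Int :=
  let sa0 := (PySem.Int.toStr a).toList
  let sb0 := (PySem.Int.toStr b).toList
  let sb := if sa0.length > sb0.length then List.replicate (sa0.length - sb0.length) '0' ++ sb0 else sb0
  let sa := if sb0.length > sa0.length then List.replicate (sb0.length - sa0.length) '0' ++ sa0 else sa0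
  let res := (sa.zip sb).foldl (fun acc p => acc ++ memeChunk p.1 p.2) []
  (PySem.Int.ofChars? res).getD 0

-- ===== PORT B =====
-- the while loop of B: a % 10 + b % 10 is collected, a and b floor-divided by 10;
-- fuel (a.natAbs + b.natAbs + 1) only makes the recursion structural — it exceeds the
-- iteration count, which the loop condition a > 0 or b > 0 bounds by a.toNat + b.toNat
def memeSums : Nat → Int → Int → List Int
  | 0, _, _ => []
  | f+1, a, b =>
    if a > 0 ∨ b > 0 then
      (PySem.Int.mod a 10 + PySem.Int.mod b 10) :: memeSums f (PySem.Int.floordiv a 10) (PySem.Int.floordiv b 10)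
    else []

def meme_sum_alt (a : Int) (b : Int) : Int :=
  let sums := memeSums (a.natAbs + b.natAbs + 1) a b
  let sums := if sums = [] then [0] else sums
  (PySem.Int.ofChars? (sums.reverse.map PySem.Int.toChars).flatten).getD 0

-- ===== PRECONDITION & SPEC =====
-- A raises ValueError on any negative argument (int('-') on the sign character).
def Pre_meme_sum (a : Int) (b : Int) : Prop := 0 ≤ a ∧ 0 ≤ b
instance (a : Int) (b : Int) : Decidable (Pre_meme_sum a b) := by unfold Pre_meme_sum; infer_instance
def pvWitness_meme_sum : Int × Int := (26, 39)

def Spec_meme_sum (a : Int) (b : Int) (out : Int) : Prop := out = meme_sum_alt a b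
instance (a : Int) (b : Int) (out : Int) : Decidable (Spec_meme_sum a b out) := by unfold Spec_meme_sum; infer_instance

-- ===== CLAIM (what is proved, stated in full; the proofs are below) =====
def Claim_equal_meme_sum : Prop := ∀ (a : Int) (b : Int), Dom_meme_sum a b → Pre_meme_sum a b → Spec_meme_sum a b (meme_sum a b)

-- ===== LEMMAS AND PROOFS =====

-- left-pad with '0' to length L
def pad (L : Nat) (cs : List Char) : List Char := List.replicate (L - cs.length) '0' ++ cs
-- the digit sum A computes for one zipped character pair
def dsum (p : Char × Char) : Int := pyDigit p.1 + pyDigit p.2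

lemma tdc_acc (b : Nat) : ∀ (f n : Nat) (ds : List Char),
    Nat.toDigitsCore b f n ds = Nat.toDigitsCore b f n [] ++ ds := by
  intro f
  induction f with
  | zero => intro n ds; simp [Nat.toDigitsCore]
  | succ g ih =>
    intro n ds
    simp only [Nat.toDigitsCore]
    by_cases h : n / b = 0
    · simp [h]
    · simp only [if_neg h]
      rw [ih (n / b) [Nat.digitChar (n % b)], ih (n / b) (Nat.digitChar (n % b) :: ds)]
      simp

lemma tdc_fuel : ∀ (f₁ f₂ n : Nat), n < f₁ → n < f₂ →
    Nat.toDigitsCore 10 f₁ n [] = Nat.toDigitsCore 10 f₂ n [] := by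
  intro f₁
  induction f₁ with
  | zero => intro f₂ n h1; omega
  | succ g ih =>
    intro f₂ n h1 h2
    cases f₂ with
    | zero => omega
    | succ h =>
      simp only [Nat.toDigitsCore]
      by_cases hz : n / 10 = 0
      · simp [hz]
      · simp only [if_neg hz]
        rw [tdc_acc, tdc_acc 10 h]
        have hlt : n / 10 < n := Nat.div_lt_self (by omega) (by omega)
        rw [ih h (n / 10) (by omega) (by omega)]

lemma toDigits_split (m : Nat) (h : 10 ≤ m) :
    Nat.toDigits 10 m = Nat.toDigits 10 (m / 10) ++ [Nat.digitChar (m % 10)] := by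
  have hz : m / 10 ≠ 0 := by omega
  have hlt : m / 10 < m := Nat.div_lt_self (by omega) (by omega)
  unfold Nat.toDigits
  conv_lhs => rw [Nat.toDigitsCore]
  rw [if_neg hz, tdc_acc]
  rw [tdc_fuel m (m / 10 + 1) (m / 10) (by omega) (by omega)]

lemma toChars_small (n : Int) (h0 : 0 ≤ n) (h9 : n ≤ 9) :
    PySem.Int.toChars n = [Nat.digitChar n.toNat] := by
  interval_cases n <;> decide

lemma floordiv_ten (n : Int) : PySem.Int.floordiv n 10 = n / 10 :=
  PySem.Int.floordiv_eq_ediv_of_pos (by norm_num)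

lemma mod_ten (n : Int) : PySem.Int.mod n 10 = n % 10 :=
  PySem.Int.mod_eq_emod_of_pos (by norm_num)

lemma toChars_split (n : Int) (h : 10 ≤ n) :
    PySem.Int.toChars n =
      PySem.Int.toChars (PySem.Int.floordiv n 10) ++ [Nat.digitChar (PySem.Int.mod n 10).toNat] := by
  have h1 : PySem.Int.floordiv n 10 = ((n.toNat / 10 : Nat) : Int) := by
    rw [floordiv_ten]; omega
  have h2 : (PySem.Int.mod n 10).toNat = n.toNat % 10 := by
    rw [mod_ten]; omega
  rw [h1, h2]
  show PySem.Int.toChars n = PySem.Int.toChars ((n.toNat / 10 : Nat) : Int) ++ _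
  unfold PySem.Int.toChars
  rw [if_neg (by omega), if_neg (by omega)]
  have : (((n.toNat / 10 : Nat) : Int)).toNat = n.toNat / 10 := by omega
  rw [this]
  exact toDigits_split n.toNat (by omega)

lemma pyDigit_digitChar (d : Nat) (h : d < 10) : pyDigit (Nat.digitChar d) = (d : Int) := by
  interval_cases d <;> decide

lemma len_toChars_pos (n : Int) (h0 : 0 ≤ n) : 1 ≤ (PySem.Int.toChars n).length := by
  by_cases h : n ≤ 9
  · rw [toChars_small n h0 h]; simp
  · rw [toChars_split n (by omega)]; simp

lemma pad_step (n : Int) (h0 : 0 ≤ n) (L : Nat) (hL : 2 ≤ L) :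
    pad L (PySem.Int.toChars n) =
      pad (L - 1) (PySem.Int.toChars (PySem.Int.floordiv n 10)) ++
        [Nat.digitChar (PySem.Int.mod n 10).toNat] := by
  by_cases h : n ≤ 9
  · have hd : PySem.Int.floordiv n 10 = 0 := by rw [floordiv_ten]; omega
    have hm : PySem.Int.mod n 10 = n := by rw [mod_ten]; omega
    rw [hd, hm, toChars_small n h0 h]
    show pad L [Nat.digitChar n.toNat] = pad (L - 1) ['0'] ++ [Nat.digitChar n.toNat]
    unfold pad
    simp only [List.length_singleton]
    have h2 : List.replicate (L - 1 - 1) '0' ++ ['0'] = List.replicate (L - 1) '0' := by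
      rw [← List.replicate_succ']
      congr 1
      omega
    rw [h2]
  · rw [toChars_split n (by omega)]
    unfold pad
    simp only [List.length_append, List.length_singleton]
    rw [show L - ((PySem.Int.toChars (PySem.Int.floordiv n 10)).length + 1)
        = L - 1 - (PySem.Int.toChars (PySem.Int.floordiv n 10)).length by omega]
    simp [List.append_assoc]

lemma len_pad (L : Nat) (cs : List Char) (h : cs.length ≤ L) : (pad L cs).length = L := by
  unfold pad; simp; omega

lemma memeSums_zero : ∀ (f : Nat), memeSums f 0 0 = [] := by
  intro f; cases f <;> simp [memeSums]

-- core invariant: A's list of per-position digit sums over the zero-padded zip equals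
-- B's divmod-collected sums, reversed
lemma sums_eq : ∀ (f : Nat) (a b : Int), 0 ≤ a → 0 ≤ b → (0 < a ∨ 0 < b) →
    a.toNat + b.toNat ≤ f →
    ((pad (max (PySem.Int.toChars a).length (PySem.Int.toChars b).length) (PySem.Int.toChars a)).zip
      (pad (max (PySem.Int.toChars a).length (PySem.Int.toChars b).length) (PySem.Int.toChars b))).map dsum
      = (memeSums f a b).reverse := by
  intro f
  induction f with
  | zero => intro a b h0a h0b hpos hle; omega
  | succ g ih =>
    intro a b h0a h0b hpos hle
    by_cases hsmall : a ≤ 9 ∧ b ≤ 9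
    · obtain ⟨ha9, hb9⟩ := hsmall
      rw [toChars_small a h0a ha9, toChars_small b h0b hb9]
      have hda : PySem.Int.floordiv a 10 = 0 := by rw [floordiv_ten]; omega
      have hdb : PySem.Int.floordiv b 10 = 0 := by rw [floordiv_ten]; omega
      have hma : PySem.Int.mod a 10 = a := by rw [mod_ten]; omega
      have hmb : PySem.Int.mod b 10 = b := by rw [mod_ten]; omega
      simp only [memeSums, if_pos hpos, hda, hdb, hma, hmb, memeSums_zero]
      show [dsum (Nat.digitChar a.toNat, Nat.digitChar b.toNat)] = [a + b].reverse
      unfold dsum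
      simp only [pyDigit_digitChar a.toNat (by omega), pyDigit_digitChar b.toNat (by omega),
        List.reverse_singleton]
      congr 1
      omega
    · have hbig : 10 ≤ a ∨ 10 ≤ b := by omega
      set a' := PySem.Int.floordiv a 10 with ha'
      set b' := PySem.Int.floordiv b 10 with hb'
      have h0a' : 0 ≤ a' := by rw [ha', floordiv_ten]; omega
      have h0b' : 0 ≤ b' := by rw [hb', floordiv_ten]; omega
      have hpos' : 0 < a' ∨ 0 < b' := by
        rcases hbig with h | h
        · left; rw [ha', floordiv_ten]; omega
        · right; rw [hb', floordiv_ten]; omega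
      have hdec : a'.toNat + b'.toNat < a.toNat + b.toNat := by
        rw [ha', hb', floordiv_ten, floordiv_ten]; omega
      set L := max (PySem.Int.toChars a).length (PySem.Int.toChars b).length with hLdef
      have hL2 : 2 ≤ L := by
        rcases hbig with h | h
        · have := len_toChars_pos a' h0a'
          have hlen : (PySem.Int.toChars a).length = (PySem.Int.toChars a').length + 1 := by
            rw [ha'] at *; rw [toChars_split a (by omega)]; simp
          rw [hLdef]; omega
        · have := len_toChars_pos b' h0b'
          have hlen : (PySem.Int.toChars b).length = (PySem.Int.toChars b').length + 1 := by
            rw [hb'] at *; rw [toChars_split b (by omega)]; simp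
          rw [hLdef]; omega
      have hL' : max (PySem.Int.toChars a').length (PySem.Int.toChars b').length = L - 1 := by
        have hca := len_toChars_pos a' h0a'
        have hcb := len_toChars_pos b' h0b'
        have hda : (PySem.Int.toChars a).length =
            if a ≤ 9 then 1 else (PySem.Int.toChars a').length + 1 := by
          split_ifs with h
          · rw [toChars_small a h0a h]; rfl
          · rw [ha']; rw [toChars_split a (by omega)]; simp
        have hdb : (PySem.Int.toChars b).length =
            if b ≤ 9 then 1 else (PySem.Int.toChars b').length + 1 := by
          split_ifs with h
          · rw [toChars_small b h0b h]; rfl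
          · rw [hb']; rw [toChars_split b (by omega)]; simp
        have hsa : a ≤ 9 → (PySem.Int.toChars a').length = 1 := by
          intro h
          have : a' = 0 := by rw [ha', floordiv_ten]; omega
          rw [this]; rfl
        have hsb : b ≤ 9 → (PySem.Int.toChars b').length = 1 := by
          intro h
          have : b' = 0 := by rw [hb', floordiv_ten]; omega
          rw [this]; rfl
        rw [hLdef]
        by_cases h2 : a ≤ 9 <;> by_cases h3 : b ≤ 9
        · omega
        · rw [hda, hdb, if_pos h2, if_neg h3, hsa h2]; omega
        · rw [hda, hdb, if_neg h2, if_pos h3, hsb h3]; omega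
        · rw [hda, hdb, if_neg h2, if_neg h3]; omega
      have hpa := pad_step a h0a L hL2
      have hpb := pad_step b h0b L hL2
      have hlen_eq : (pad (L - 1) (PySem.Int.toChars a')).length
          = (pad (L - 1) (PySem.Int.toChars b')).length := by
        have h1 : (PySem.Int.toChars a').length ≤ L - 1 := by
          have := hL'; omega
        have h2 : (PySem.Int.toChars b').length ≤ L - 1 := by
          have := hL'; omega
        rw [len_pad _ _ h1, len_pad _ _ h2]
      rw [hpa, hpb, List.zip_append hlen_eq, List.map_append]
      rw [← hL']
      rw [ih a' b' h0a' h0b' hpos' (by omega)]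
      have hms : memeSums (g + 1) a b
          = (PySem.Int.mod a 10 + PySem.Int.mod b 10) :: memeSums g a' b' := by
        simp [memeSums, if_pos hpos, ha', hb']
      rw [hms, List.reverse_cons]
      congr 1
      show [dsum (Nat.digitChar (PySem.Int.mod a 10).toNat, Nat.digitChar (PySem.Int.mod b 10).toNat)] = _
      unfold dsum
      have hma : (PySem.Int.mod a 10).toNat < 10 := by rw [mod_ten]; omega
      have hmb : (PySem.Int.mod b 10).toNat < 10 := by rw [mod_ten]; omega
      simp only [pyDigit_digitChar _ hma, pyDigit_digitChar _ hmb]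
      congr 1
      rw [mod_ten, mod_ten]
      omega

-- ===== VERDICT (by name: the statement is the Claim_ definition above) =====
theorem meme_sum_spec : Claim_equal_meme_sum := by
  intro a b _ hpre
  obtain ⟨h0a, h0b⟩ := hpre
  show meme_sum a b = meme_sum_alt a b
  by_cases hz : a = 0 ∧ b = 0
  · obtain ⟨ha, hb⟩ := hz; subst ha; subst hb; decide
  · have hpos : 0 < a ∨ 0 < b := by omega
    unfold meme_sum meme_sum_alt
    simp only [PySem.Int.toList_toStr, PySem.List.foldl_append_eq_flatMap, List.nil_append,
      List.flatMap_def]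
    have hfuel : a.toNat + b.toNat ≤ a.natAbs + b.natAbs + 1 := by omega
    have hne : memeSums (a.natAbs + b.natAbs + 1) a b ≠ [] := by
      have : 1 ≤ a.natAbs + b.natAbs := by omega
      obtain ⟨g, hg⟩ : ∃ g, a.natAbs + b.natAbs + 1 = g + 1 := ⟨_, rfl⟩
      rw [hg]
      simp [memeSums, if_pos hpos]
    rw [if_neg hne]
    have hpads : (if (PySem.Int.toChars a).length > (PySem.Int.toChars b).length then
          List.replicate ((PySem.Int.toChars a).length - (PySem.Int.toChars b).length) '0'
            ++ PySem.Int.toChars b else PySem.Int.toChars b)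
        = pad (max (PySem.Int.toChars a).length (PySem.Int.toChars b).length)
            (PySem.Int.toChars b) := by
      unfold pad
      split_ifs with h
      · congr 2; omega
      · rw [show max (PySem.Int.toChars a).length (PySem.Int.toChars b).length
            - (PySem.Int.toChars b).length = 0 by omega]
        simp
    have hpada : (if (PySem.Int.toChars b).length > (PySem.Int.toChars a).length then
          List.replicate ((PySem.Int.toChars b).length - (PySem.Int.toChars a).length) '0'
            ++ PySem.Int.toChars a else PySem.Int.toChars a)
        = pad (max (PySem.Int.toChars a).length (PySem.Int.toChars b).length)
            (PySem.Int.toChars a) := by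
      unfold pad
      split_ifs with h
      · congr 2; omega
      · rw [show max (PySem.Int.toChars a).length (PySem.Int.toChars b).length
            - (PySem.Int.toChars a).length = 0 by omega]
        simp
    rw [hpads, hpada]
    have hsums := sums_eq (a.natAbs + b.natAbs + 1) a b h0a h0b hpos hfuel
    have hmain : ((pad (max (PySem.Int.toChars a).length (PySem.Int.toChars b).length)
          (PySem.Int.toChars a)).zip
        (pad (max (PySem.Int.toChars a).length (PySem.Int.toChars b).length)
          (PySem.Int.toChars b))).map (fun p => memeChunk p.1 p.2)
        = ((memeSums (a.natAbs + b.natAbs + 1) a b).reverse).map PySem.Int.toChars := by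
      rw [← hsums, List.map_map]
      rfl
    rw [hmain]
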